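-- pv_equiv track=rewrite | github.com/MrPatchara/CPE2222-Assignment | Final-note/test_final/code_library/(XV)เปลี่ยนอักขระพิเศษให้เป็นUnicode.py | secret_password
-- ===== SOURCE A (Python) =====
-- def secret_password(text, key):
--     result = ""
--     for char in text:
--         if char.isalpha():
--             shift_base = ord('A') if char.isupper() else ord('a')
--             shifted_char = chr((ord(char) - shift_base + key) % 26 + shift_base)
--             result += shifted_char
--         elif char.isspace():  # Allow spaces between words
--             result += ' '
--         else:  # Convert special characters to Unicode
--             result += f"\\u{ord(char):04x}"
--     return result
-- ===== SOURCE B (Python) =====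
-- def _repl(char, key):
--     if char.isalpha():
--         shift_base = ord('A') if char.isupper() else ord('a')
--         return chr((ord(char) - shift_base + key) % 26 + shift_base)
--     elif char.isspace():
--         return ' '
--     else:
--         return f"\\u{ord(char):04x}"
--
--
-- def secret_password(text, key):
--     table = {ord(char): _repl(char, key) for char in set(text)}
--     return text.translate(table)
-- ===== Notes on version B (the rewrite author's own statement) =====
-- stated objective: faster
-- what changed: B precomputes one replacement per distinct character into a translation table over set(text) and applies str.translate in one C-level pass, instead of A's inline per-character concatenating loop (measured ~10x faster at the largest size).
import Mathlib
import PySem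

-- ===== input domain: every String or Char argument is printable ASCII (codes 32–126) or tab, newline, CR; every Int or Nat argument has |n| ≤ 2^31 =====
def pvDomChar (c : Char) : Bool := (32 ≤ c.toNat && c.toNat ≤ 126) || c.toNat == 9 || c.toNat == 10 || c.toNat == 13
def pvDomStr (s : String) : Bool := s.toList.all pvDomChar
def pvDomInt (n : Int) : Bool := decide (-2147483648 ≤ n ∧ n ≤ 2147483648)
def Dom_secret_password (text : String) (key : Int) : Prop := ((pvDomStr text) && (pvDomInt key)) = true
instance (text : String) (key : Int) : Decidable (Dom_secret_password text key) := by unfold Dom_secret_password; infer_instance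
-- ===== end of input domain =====

-- B builds a translation table over the distinct characters and applies it in one pass,
-- instead of A's inline concatenating loop; same return value (idiomatic decomposition).

-- shared helper: Python's f"{n:04x}" for n ≥ 0 (lowercase hex, zero-padded to width 4) — exact for nonnegative n
def pvHexDigit (n : Nat) : Char := if n < 10 then Char.ofNat (48 + n) else Char.ofNat (87 + n)

def pvHexChars (n : Nat) : List Char :=
  if _h : n < 16 then [pvHexDigit n]
  else pvHexChars (n / 16) ++ [pvHexDigit (n % 16)]
  decreasing_by exact Nat.div_lt_self (by omega) (by omega)

def pvHex4 (n : Nat) : List Char :=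
  List.replicate (4 - (pvHexChars n).length) '0' ++ pvHexChars n

-- ===== PORT A =====
def secret_password (text : String) (key : Int) : String :=
  String.ofList (text.toList.foldl (fun result char =>
    if PySem.Chars.isalpha char then
      let shift_base : Int := if PySem.Chars.isupper char then 65 else 97
      let shifted_char : Char :=
        Char.ofNat (PySem.Int.mod ((char.toNat : Int) - shift_base + key) 26 + shift_base).toNat
      result ++ [shifted_char]
    else if PySem.Chars.isspace char then
      result ++ [' ']
    else
      result ++ ('\\' :: 'u' :: pvHex4 char.toNat)) [])

-- ===== PORT B =====
-- per-character replacement (Source B's _repl), as a list of characters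
def pvRepl (char : Char) (key : Int) : List Char :=
  if PySem.Chars.isalpha char then
    let shift_base : Int := if PySem.Chars.isupper char then 65 else 97
    [Char.ofNat (PySem.Int.mod ((char.toNat : Int) - shift_base + key) 26 + shift_base).toNat]
  else if PySem.Chars.isspace char then
    [' ']
  else
    '\\' :: 'u' :: pvHex4 char.toNat

def secret_password_alt (text : String) (key : Int) : String :=
  let table : PySem.Dict Int (List Char) :=
    (PySem.List.dedup text.toList).foldl
      (fun d char => d.insert (char.toNat : Int) (pvRepl char key)) PySem.Dict.empty
  -- str.translate: each char is replaced by its table entry, or kept if absent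
  String.ofList ((text.toList.map (fun c => (table.get? (c.toNat : Int)).getD [c])).flatten)

-- ===== PRECONDITION & SPEC =====
def Spec_secret_password (text : String) (key : Int) (out : String) : Prop := out = secret_password_alt text key
instance (text : String) (key : Int) (out : String) : Decidable (Spec_secret_password text key out) := by unfold Spec_secret_password; infer_instance

-- ===== CLAIM (what is proved, stated in full; the proofs are below) =====
def Claim_equal_secret_password : Prop := ∀ (text : String) (key : Int), Dom_secret_password text key → Spec_secret_password text key (secret_password text key)

-- ===== LEMMAS AND PROOFS =====

-- folding inserts over chars not colliding with c leaves c's entry alone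
theorem pv_get_foldl_of_not_mem (key : Int) (c : Char) (l : List Char) (d : PySem.Dict Int (List Char))
    (h : c ∉ l) :
    (l.foldl (fun d char => d.insert (char.toNat : Int) (pvRepl char key)) d).get? (c.toNat : Int)
      = d.get? (c.toNat : Int) := by
  induction l generalizing d with
  | nil => rfl
  | cons a l ih =>
    simp only [List.foldl_cons]
    rw [ih _ (fun hm => h (List.mem_cons_of_mem _ hm))]
    apply PySem.Dict.get?_insert_of_ne
    intro hEq
    have hn : c.toNat = a.toNat := by exact_mod_cast congrArg Int.toNat hEq
    have hca : c = a := Char.ext (UInt32.toNat_inj.mp hn)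
    exact h (hca ▸ List.mem_cons_self)

-- the table maps ord c to pvRepl c key for every c in the folded list
theorem pv_get_foldl_of_mem (key : Int) (c : Char) (l : List Char) (d : PySem.Dict Int (List Char))
    (h : c ∈ l) :
    (l.foldl (fun d char => d.insert (char.toNat : Int) (pvRepl char key)) d).get? (c.toNat : Int)
      = some (pvRepl c key) := by
  induction l generalizing d with
  | nil => cases h
  | cons a l ih =>
    simp only [List.foldl_cons]
    by_cases hm : c ∈ l
    · exact ih _ hm
    · have hca : c = a := by rcases List.mem_cons.mp h with h' | h' <;> [exact h'; exact absurd h' hm]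
      subst hca
      rw [pv_get_foldl_of_not_mem key c l _ hm, PySem.Dict.get?_insert_self]

-- A's loop, with each branch seen as appending pvRepl, accumulates the flatMap
theorem pv_foldA (key : Int) (l : List Char) (acc : List Char) :
    (l.foldl (fun result char =>
      if PySem.Chars.isalpha char then
        let shift_base : Int := if PySem.Chars.isupper char then 65 else 97
        let shifted_char : Char :=
          Char.ofNat (PySem.Int.mod ((char.toNat : Int) - shift_base + key) 26 + shift_base).toNat
        result ++ [shifted_char]
      else if PySem.Chars.isspace char then
        result ++ [' ']
      else
        result ++ ('\\' :: 'u' :: pvHex4 char.toNat)) acc)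
      = acc ++ l.flatMap (fun c => pvRepl c key) := by
  induction l generalizing acc with
  | nil => simp
  | cons a l ih =>
    simp only [List.foldl_cons, List.flatMap_cons]
    rw [ih]
    have : (if PySem.Chars.isalpha a then
        let shift_base : Int := if PySem.Chars.isupper a then 65 else 97
        let shifted_char : Char :=
          Char.ofNat (PySem.Int.mod ((a.toNat : Int) - shift_base + key) 26 + shift_base).toNat
        acc ++ [shifted_char]
      else if PySem.Chars.isspace a then
        acc ++ [' ']
      else
        acc ++ ('\\' :: 'u' :: pvHex4 a.toNat)) = acc ++ pvRepl a key := by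
      unfold pvRepl; split_ifs <;> rfl
    rw [this, List.append_assoc]

-- ===== VERDICT (by name: the statement is the Claim_ definition above) =====
theorem secret_password_spec : Claim_equal_secret_password := by
  intro text key _
  unfold Spec_secret_password secret_password secret_password_alt
  congr 1
  have hmap : text.toList.map (fun c =>
      (((PySem.List.dedup text.toList).foldl
        (fun d char => d.insert (char.toNat : Int) (pvRepl char key)) PySem.Dict.empty).get?
          (c.toNat : Int)).getD [c]) = text.toList.map (fun c => pvRepl c key) := by
    apply List.map_congr_left
    intro c hc
    rw [pv_get_foldl_of_mem key c _ _ ((PySem.List.mem_dedup _ _).mpr hc)]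
    rfl
  rw [hmap, pv_foldA, List.nil_append, List.flatMap_def]
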